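-- pv_equiv track=rewrite | github.com/casperg92/opportunities_in_protein_design_review | protein_tools.py | secondary_structure_ranges
-- ===== SOURCE A (Python) =====
-- def secondary_structure_ranges(array, offset=0):
--     ranges = {}
--     start = None
--     prev_elem = None
--
--     for i, elem in enumerate(array):
--         if elem != '-' and elem != prev_elem:
--             if start is not None and prev_elem is not None and prev_elem != '-':
--                 if prev_elem in ranges:
--                     ranges[prev_elem].append([start + offset, i - 1 + offset])
--                 else:
--                     ranges[prev_elem] = [[start + offset, i - 1 + offset]]
--             start = i
--         elif elem == '-' and prev_elem != '-':
--             if prev_elem is not None and prev_elem in ranges: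
--                 ranges[prev_elem].append([start + offset, i - 1 + offset])
--             elif prev_elem is not None:
--                 ranges[prev_elem] = [[start + offset, i - 1 + offset]]
--             start = None
--
--         prev_elem = elem
--
--     if start is not None and prev_elem is not None and prev_elem != '-':
--         if prev_elem in ranges:
--             ranges[prev_elem].append([start + offset, len(array) - 1 + offset])
--         else:
--             ranges[prev_elem] = [[start + offset, len(array) - 1 + offset]]
--
--     return ranges
-- ===== SOURCE B (Python) =====
-- def secondary_structure_ranges(array, offset=0):
--     ranges = {}
--     i, n = 0, len(array)
--     while i < n:
--         v = array[i]
--         j = i + 1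
--         while j < n and array[j] == v:
--             j += 1
--         if v != '-':
--             ranges.setdefault(v, []).append([i + offset, j - 1 + offset])
--         i = j
--     return ranges
-- ===== Notes on version B (the rewrite author's own statement) =====
-- stated objective: simpler
-- what changed: Replaced A's element-by-element state machine (prev_elem/start sentinels with None and three branch cases plus a trailing flush) by a direct run-length scan: each maximal run of equal elements is found with an inner index scan and its inclusive range appended at once via dict.setdefault.
import Mathlib
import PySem

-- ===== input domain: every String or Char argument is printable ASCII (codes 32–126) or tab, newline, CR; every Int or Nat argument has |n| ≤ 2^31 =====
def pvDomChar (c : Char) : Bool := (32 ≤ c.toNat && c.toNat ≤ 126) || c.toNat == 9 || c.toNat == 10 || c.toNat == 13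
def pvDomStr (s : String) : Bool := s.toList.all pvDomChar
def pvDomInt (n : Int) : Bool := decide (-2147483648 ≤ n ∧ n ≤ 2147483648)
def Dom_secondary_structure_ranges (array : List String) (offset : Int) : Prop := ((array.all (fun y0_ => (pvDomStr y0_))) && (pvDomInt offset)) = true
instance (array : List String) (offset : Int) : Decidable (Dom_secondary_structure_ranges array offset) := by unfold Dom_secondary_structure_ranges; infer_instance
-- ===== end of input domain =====

-- B replaces A's element-by-element prev/start state machine by a direct run-length scan
-- (find each maximal run of equal elements, emit its inclusive range at once); objective: simpler.

-- ===== PORT A =====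
-- 'if prev in ranges: ranges[prev].append(val) else: ranges[prev] = [val]' (both of A's
-- duplicated blocks and B's setdefault+append perform exactly this update)
def pushRange (d : PySem.Dict String (List (List Int))) (k : String) (v : List Int) :
    PySem.Dict String (List (List Int)) :=
  if d.contains k then d.modify k [] (fun l => l ++ [v]) else d.insert k [v]

-- one iteration of A's for-loop; state = (ranges, start, prev_elem)
def aStep (offset : Int)
    (st : PySem.Dict String (List (List Int)) × Option Int × Option String)
    (p : Int × String) :
    PySem.Dict String (List (List Int)) × Option Int × Option String :=
  let ranges := st.1; let start := st.2.1; let prev := st.2.2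
  let i := p.1; let elem := p.2
  if elem ≠ "-" ∧ prev ≠ some elem then
    -- 'if start is not None and prev_elem is not None and prev_elem != '-''
    let ranges' := match start, prev with
      | some s, some q => if q ≠ "-" then pushRange ranges q [s + offset, i - 1 + offset] else ranges
      | _, _ => ranges
    (ranges', some i, some elem)
  else if elem = "-" ∧ prev ≠ some "-" then
    -- Python reads 'start' here only when prev is not None; in that reachable case start is
    -- always set, so matching on both options is faithful
    let ranges' := match start, prev with
      | some s, some q => pushRange ranges q [s + offset, i - 1 + offset]
      | _, _ => ranges
    (ranges', none, some elem)
  else (ranges, start, some elem)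

-- A's trailing flush after the loop
def aFin (offset endIdx : Int)
    (st : PySem.Dict String (List (List Int)) × Option Int × Option String) :
    PySem.Dict String (List (List Int)) :=
  match st.2.1, st.2.2 with
  | some s, some q => if q ≠ "-" then pushRange st.1 q [s + offset, endIdx + offset] else st.1
  | _, _ => st.1

def secondary_structure_ranges (array : List String) (offset : Int) : List (String × List (List Int)) :=
  (aFin offset ((array.length : Int) - 1)
    ((PySem.List.enumerate array 0).foldl (aStep offset) (PySem.Dict.empty, none, none))).items

-- ===== PORT B =====
-- outer while-loop of Source B: head of the list is array[i], the inner while-scan over the run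
-- of equal elements is the takeWhile/dropWhile split, j = i + run length
def bLoop (offset : Int) : List String → Int → PySem.Dict String (List (List Int)) →
    PySem.Dict String (List (List Int))
  | [], _, r => r
  | v :: rest, i, r =>
    let j : Int := i + 1 + (rest.takeWhile (fun x => x == v)).length
    let r' := if v ≠ "-" then r.modify v [] (fun l => l ++ [[i + offset, j - 1 + offset]]) else r
    bLoop offset (rest.dropWhile (fun x => x == v)) j r'
termination_by xs => xs.length
decreasing_by
  exact Nat.lt_succ_of_le (List.length_dropWhile_le _ _)

def secondary_structure_ranges_alt (array : List String) (offset : Int) : List (String × List (List Int)) :=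
  (bLoop offset array 0 PySem.Dict.empty).items

-- ===== PRECONDITION & SPEC =====
def Spec_secondary_structure_ranges (array : List String) (offset : Int) (out : List (String × List (List Int))) : Prop := out = secondary_structure_ranges_alt array offset
instance (array : List String) (offset : Int) (out : List (String × List (List Int))) : Decidable (Spec_secondary_structure_ranges array offset out) := by unfold Spec_secondary_structure_ranges; infer_instance

-- ===== CLAIM (what is proved, stated in full; the proofs are below) =====
def Claim_equal_secondary_structure_ranges : Prop := ∀ (array : List String) (offset : Int), Dom_secondary_structure_ranges array offset → Spec_secondary_structure_ranges array offset (secondary_structure_ranges array offset)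

-- ===== LEMMAS AND PROOFS =====

-- B's setdefault+append is the same dict update as A's contains-branch
lemma pushRange_eq_modify (d : PySem.Dict String (List (List Int))) (k : String) (v : List Int) :
    pushRange d k v = d.modify k [] (fun l => l ++ [v]) := by
  unfold pushRange
  by_cases h : d.contains k = true
  · simp [h]
  · have hg : d.getD k [] = [] :=
      PySem.Dict.getD_of_not_contains d [] (by simpa using h)
    simp [h, PySem.Dict.modify, hg]

-- peeling one gap element off B's loop
lemma bLoop_gap_peel (offset : Int) (t : List String) (i : Int)
    (r : PySem.Dict String (List (List Int))) :
    bLoop offset ("-" :: t) i r = bLoop offset t (i + 1) r := by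
  cases t with
  | nil => simp [bLoop]
  | cons w t2 =>
    by_cases hw : w = "-"
    · subst hw
      rw [bLoop, bLoop]
      simp only [List.takeWhile_cons, List.dropWhile_cons, beq_self_eq_true]
      simp
      ring_nf
    · rw [bLoop]
      simp [hw]

-- main invariant: running A's loop (plus its trailing flush at index i + |xs| - 1) from each
-- reachable loop state equals B's run scan on the remaining suffix
lemma main_inv (offset : Int) : ∀ (N : Nat) (xs : List String), xs.length ≤ N →
    ∀ (i : Int) (r : PySem.Dict String (List (List Int))),
      (aFin offset (i + xs.length - 1)
        ((PySem.List.enumerate xs i).foldl (aStep offset) (r, none, none)) = bLoop offset xs i r)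
    ∧ (aFin offset (i + xs.length - 1)
        ((PySem.List.enumerate xs i).foldl (aStep offset) (r, none, some "-")) = bLoop offset xs i r)
    ∧ ∀ (s : Int) (q : String), q ≠ "-" →
        aFin offset (i + xs.length - 1)
          ((PySem.List.enumerate xs i).foldl (aStep offset) (r, some s, some q))
        = bLoop offset (xs.dropWhile (fun x => x == q))
            (i + (xs.takeWhile (fun x => x == q)).length)
            (pushRange r q [s + offset, i + (xs.takeWhile (fun x => x == q)).length - 1 + offset]) := by
  intro N
  induction N with
  | zero =>
    intro xs hlen i r
    have hx : xs = [] := List.eq_nil_of_length_eq_zero (Nat.le_zero.mp hlen)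
    subst hx
    refine ⟨by simp [aFin, bLoop], by simp [aFin, bLoop], ?_⟩
    intro s q hq
    simp [aFin, bLoop, hq]
  | succ n ih =>
    intro xs hlen i r
    cases xs with
    | nil =>
      refine ⟨by simp [aFin, bLoop], by simp [aFin, bLoop], ?_⟩
      intro s q hq
      simp [aFin, bLoop, hq]
    | cons v t =>
      have hlt : t.length ≤ n := by simpa using Nat.succ_le_succ_iff.mp (by simpa using hlen)
      have hlen1 : (i + ((v :: t).length : Int) - 1) = (i + 1) + (t.length : Int) - 1 := by
        push_cast [List.length_cons]; ring
      refine ⟨?_, ?_, ?_⟩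
      · -- state (r, none, none)
        by_cases hv : v = "-"
        · subst hv
          have e : aStep offset (r, none, none) (i, "-") = (r, none, some "-") := by
            simp [aStep]
          rw [PySem.List.enumerate_cons, List.foldl_cons, e, hlen1, bLoop_gap_peel]
          exact (ih t hlt (i + 1) r).2.1
        · have e : aStep offset (r, none, none) (i, v) = (r, some i, some v) := by
            simp [aStep, hv]
          rw [PySem.List.enumerate_cons, List.foldl_cons, e, hlen1]
          have h1 := (ih t hlt (i + 1) r).2.2 i v hv
          rw [bLoop]
          simp only [pushRange_eq_modify] at h1 ⊢
          simp only [hv, ne_eq, not_false_iff, if_true]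
          ring_nf at h1 ⊢
          exact h1
      · -- state (r, none, some "-")
        by_cases hv : v = "-"
        · subst hv
          have e : aStep offset (r, none, some "-") (i, "-") = (r, none, some "-") := by
            simp [aStep]
          rw [PySem.List.enumerate_cons, List.foldl_cons, e, hlen1, bLoop_gap_peel]
          exact (ih t hlt (i + 1) r).2.1
        · have e : aStep offset (r, none, some "-") (i, v) = (r, some i, some v) := by
            simp [aStep, hv, Ne.symm hv]
          rw [PySem.List.enumerate_cons, List.foldl_cons, e, hlen1]
          have h1 := (ih t hlt (i + 1) r).2.2 i v hv
          rw [bLoop]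
          simp only [pushRange_eq_modify] at h1 ⊢
          simp only [hv, ne_eq, not_false_iff, if_true]
          ring_nf at h1 ⊢
          exact h1
      · -- state (r, some s, some q)
        intro s q hq
        by_cases hvq : v = q
        · subst hvq
          have e : aStep offset (r, some s, some v) (i, v) = (r, some s, some v) := by
            simp [aStep, hq]
          rw [PySem.List.enumerate_cons, List.foldl_cons, e, hlen1]
          have h1 := (ih t hlt (i + 1) r).2.2 s v hq
          simp only [List.takeWhile_cons, List.dropWhile_cons, beq_self_eq_true, if_true,
            List.length_cons]
          push_cast at h1 ⊢
          ring_nf at h1 ⊢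
          exact h1
        · have htw : (((v :: t).takeWhile (fun x => x == q)) : List String) = [] := by
            simp [hvq]
          have hdw : (((v :: t).dropWhile (fun x => x == q)) : List String) = v :: t := by
            simp [hvq]
          by_cases hv : v = "-"
          · subst hv
            have e : aStep offset (r, some s, some q) (i, "-")
                = (pushRange r q [s + offset, i - 1 + offset], none, some "-") := by
              simp [aStep, hq]
            rw [PySem.List.enumerate_cons, List.foldl_cons, e, hlen1, htw, hdw]
            have h1 := (ih t hlt (i + 1) (pushRange r q [s + offset, i - 1 + offset])).2.1
            simp only [List.length_nil, Nat.cast_zero, add_zero]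
            rw [bLoop_gap_peel]
            exact h1
          · have e : aStep offset (r, some s, some q) (i, v)
                = (pushRange r q [s + offset, i - 1 + offset], some i, some v) := by
              simp [aStep, hq, hv, Ne.symm hvq]
            rw [PySem.List.enumerate_cons, List.foldl_cons, e, hlen1, htw, hdw]
            have h1 := (ih t hlt (i + 1) (pushRange r q [s + offset, i - 1 + offset])).2.2 i v hv
            simp only [List.length_nil, Nat.cast_zero, add_zero]
            rw [bLoop]
            simp only [pushRange_eq_modify] at h1 ⊢
            simp only [hv, ne_eq, not_false_iff, if_true]
            ring_nf at h1 ⊢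
            exact h1

-- ===== VERDICT (by name: the statement is the Claim_ definition above) =====
theorem secondary_structure_ranges_spec : Claim_equal_secondary_structure_ranges := by
  intro array offset _
  unfold Spec_secondary_structure_ranges secondary_structure_ranges secondary_structure_ranges_alt
  have h := (main_inv offset array.length array le_rfl 0 PySem.Dict.empty).1
  rw [show ((0 : Int) + array.length - 1) = (array.length : Int) - 1 by ring] at h
  rw [h]
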